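-- pv_equiv track=rewrite | github.com/Deviloxide/Euler-Project | Problem 092 - Square Digit Chains.py | square_digit_chains
-- ===== SOURCE A (Python) =====
-- def square_digit_chains(limit, choice):
--     total = 0
--
--     for num in range(1, limit):
--         while num != 1:
--             if num != 89:
--                 num_str = str(num)
--                 subtotal = 0
--
--                 for char in num_str:
--                     subtotal += int(char) ** 2
--
--                 num = subtotal
--             else:
--                 total += 1
--                 break
--
--     if choice == 89:
--         return total
--     elif choice == 1:
--         return limit - total - 1
--     else:
--         return 0
-- ===== SOURCE B (Python) =====
-- def square_digit_chains(limit, choice):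
--     # Memoize the chain outcome per one-step digit-square sum instead of walking
--     # the whole chain for every number.
--     cache = {}
--     total = 0
--     for num in range(1, limit):
--         s = sum(int(c) ** 2 for c in str(num))
--         if s not in cache:
--             n = s
--             while n != 1 and n != 89:
--                 n = sum(int(c) ** 2 for c in str(n))
--             cache[s] = (n == 89)
--         if cache[s]:
--             total += 1
--     if choice == 89:
--         return total
--     elif choice == 1:
--         return limit - total - 1
--     else:
--         return 0
-- ===== Notes on version B (the rewrite author's own statement) =====
-- stated objective: faster
-- what changed: Instead of walking the full square-digit chain for every number, B takes one digit-square-sum step per number and memoizes the chain outcome per sum in a dict, so each chain is walked at most once per distinct sum.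
import Mathlib
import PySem

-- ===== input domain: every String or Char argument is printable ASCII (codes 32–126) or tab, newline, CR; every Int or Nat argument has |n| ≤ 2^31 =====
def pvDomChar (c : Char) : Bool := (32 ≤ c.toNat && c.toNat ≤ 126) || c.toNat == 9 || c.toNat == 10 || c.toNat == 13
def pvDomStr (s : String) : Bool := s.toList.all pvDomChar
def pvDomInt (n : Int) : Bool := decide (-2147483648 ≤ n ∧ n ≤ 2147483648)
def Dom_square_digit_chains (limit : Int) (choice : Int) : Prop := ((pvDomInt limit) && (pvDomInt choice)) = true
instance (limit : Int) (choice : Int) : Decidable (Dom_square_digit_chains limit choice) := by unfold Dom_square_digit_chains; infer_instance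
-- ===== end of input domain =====

-- B memoizes the chain outcome per one-step digit-square sum (dict cache), so each
-- chain is walked at most once per distinct sum instead of once per number.


-- ===== PORT A =====
-- int(char) for one char of str(num); the .getD 0 default is never hit here: every
-- num reaching it is ≥ 1, so the chars of str(num) are digits and int(char) succeeds
def pvIntChar (c : Char) : Int := (PySem.Int.ofChars? [c]).getD 0

-- the inner 'for char in num_str: subtotal += int(char) ** 2' loop
def pvDsqA (num : Int) : Int :=
  (PySem.Int.toChars num).foldl (fun subtotal char => subtotal + pvIntChar char ^ 2) 0

-- the 'while num != 1: …' loop, carrying total; fuel only makes the recursion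
-- structural (1001 steps are never exhausted by any chain started below 2^31)
def pvWhileA (fuel : Nat) (total : Int) (num : Int) : Int :=
  if num = 1 then total
  else if num = 89 then total + 1
  else match fuel with
    | 0 => total
    | f + 1 => pvWhileA f total (pvDsqA num)

def square_digit_chains (limit : Int) (choice : Int) : Int :=
  let total := (PySem.List.pyRange 1 limit 1).foldl (fun total num => pvWhileA 1001 total num) 0
  if choice = 89 then total
  else if choice = 1 then limit - total - 1
  else 0

-- ===== PORT B =====
-- sum(int(c) ** 2 for c in str(n))
def pvDsqB (n : Int) : Int :=
  ((PySem.Int.toChars n).map (fun c => pvIntChar c ^ 2)).sum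

-- the 'while n != 1 and n != 89: …' chase loop; fuel only makes it structural
def pvChase (fuel : Nat) (n : Int) : Int :=
  if n ≠ 1 ∧ n ≠ 89 then
    match fuel with
    | 0 => n
    | f + 1 => pvChase f (pvDsqB n)
  else n

-- one iteration of B's main loop over (total, cache); cache[s] after the fill is
-- read with getD (the key s is always present at that point)
def pvStepB (st : Int × PySem.Dict Int Bool) (num : Int) : Int × PySem.Dict Int Bool :=
  let s := pvDsqB num
  let cache := if st.2.contains s then st.2 else st.2.insert s (decide (pvChase 1000 s = 89))
  (if cache.getD s false then st.1 + 1 else st.1, cache)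

def square_digit_chains_alt (limit : Int) (choice : Int) : Int :=
  let total := ((PySem.List.pyRange 1 limit 1).foldl pvStepB (0, PySem.Dict.empty)).1
  if choice = 89 then total
  else if choice = 1 then limit - total - 1
  else 0

-- ===== PRECONDITION & SPEC =====
def Spec_square_digit_chains (limit : Int) (choice : Int) (out : Int) : Prop := out = square_digit_chains_alt limit choice
instance (limit : Int) (choice : Int) (out : Int) : Decidable (Spec_square_digit_chains limit choice out) := by unfold Spec_square_digit_chains; infer_instance

-- ===== CLAIM (what is proved, stated in full; the proofs are below) =====
def Claim_equal_square_digit_chains : Prop := ∀ (limit : Int) (choice : Int), Dom_square_digit_chains limit choice → Spec_square_digit_chains limit choice (square_digit_chains limit choice)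

-- ===== LEMMAS AND PROOFS =====

-- the two digit-square sums agree
theorem pvDsq_eq (n : Int) : pvDsqA n = pvDsqB n := by
  simp [pvDsqA, pvDsqB, List.sum_eq_foldl, List.foldl_map]

-- A's while loop computed as a chase to the terminal value, in lockstep on fuel
theorem pvWhile_eq_chase (fuel : Nat) (total num : Int) :
    pvWhileA fuel total num = total + (if pvChase fuel num = 89 then 1 else 0) := by
  induction fuel generalizing num with
  | zero =>
    by_cases h1 : num = 1
    · simp [pvWhileA, pvChase, h1]
    · by_cases h2 : num = 89 <;> simp [pvWhileA, pvChase, h2]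
  | succ f ih =>
    by_cases h1 : num = 1
    · simp [pvWhileA, pvChase, h1]
    · by_cases h2 : num = 89
      · simp [pvWhileA, pvChase, h2]
      · rw [show pvWhileA (f + 1) total num = pvWhileA f total (pvDsqA num) by
            simp [pvWhileA, h1, h2],
          show pvChase (f + 1) num = pvChase f (pvDsqB num) by
            simp [pvChase, h1, h2]]
        rw [pvDsq_eq, ih]

-- unfolding one chase step when the loop condition holds
theorem pvChase_succ (f : Nat) (n : Int) (h1 : n ≠ 1) (h2 : n ≠ 89) :
    pvChase (f + 1) n = pvChase f (pvDsqB n) := by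
  rw [pvChase]; simp [h1, h2]

-- one extra unit of fuel on num equals a chase from its one-step sum
theorem pvChase_step (num : Int) :
    pvChase 1001 num = 89 ↔ pvChase 1000 (pvDsqB num) = 89 := by
  by_cases h1 : num = 1
  · subst h1; decide
  · by_cases h2 : num = 89
    · subst h2; decide
    · rw [show (1001 : Nat) = 1000 + 1 from rfl, pvChase_succ 1000 num h1 h2]

-- cache invariant: every stored value is the canonical chain outcome of its key
def pvInv (d : PySem.Dict Int Bool) : Prop :=
  ∀ s : Int, d.contains s = true → d.getD s false = decide (pvChase 1000 s = 89)

theorem pvStepB_eq (t : Int) (d : PySem.Dict Int Bool) (num : Int) (hd : pvInv d) :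
    pvStepB (t, d) num = (pvWhileA 1001 t num, (pvStepB (t, d) num).2) ∧
      pvInv (pvStepB (t, d) num).2 := by
  have hcache : ∀ (c : PySem.Dict Int Bool),
      c = (if d.contains (pvDsqB num) then d else d.insert (pvDsqB num) (decide (pvChase 1000 (pvDsqB num) = 89))) →
      pvInv c ∧ c.getD (pvDsqB num) false = decide (pvChase 1000 (pvDsqB num) = 89) := by
    intro c hc
    by_cases h : d.contains (pvDsqB num) = true
    · simp only [h, if_true] at hc; subst hc
      exact ⟨hd, hd _ h⟩
    · simp only [h, if_false, Bool.false_eq_true] at hc; subst hc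
      refine ⟨?_, by rw [PySem.Dict.getD_insert_self]⟩
      intro s hs
      by_cases hss : s = pvDsqB num
      · subst hss; rw [PySem.Dict.getD_insert_self]
      · rw [PySem.Dict.getD_insert]
        simp only [hss, if_false]
        apply hd
        rw [PySem.Dict.contains_insert] at hs
        simpa [hss] using hs
  obtain ⟨hinv, hval⟩ := hcache _ rfl
  refine ⟨?_, by simpa only [pvStepB] using hinv⟩
  simp only [pvStepB]
  rw [hval, pvWhile_eq_chase]
  by_cases h89 : pvChase 1000 (pvDsqB num) = 89
  · simp [h89, (pvChase_step num).mpr h89]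
  · have hne : ¬ pvChase 1001 num = 89 := fun h => h89 ((pvChase_step num).mp h)
    simp [h89, hne]

theorem pvFold_eq (l : List Int) (t : Int) (d : PySem.Dict Int Bool) (hd : pvInv d) :
    (l.foldl pvStepB (t, d)).1 = l.foldl (fun total num => pvWhileA 1001 total num) t := by
  induction l generalizing t d with
  | nil => rfl
  | cons num l ih =>
    obtain ⟨hstep, hinv⟩ := pvStepB_eq t d num hd
    simp only [List.foldl_cons]
    rw [hstep, ih _ _ hinv]

-- ===== VERDICT (by name: the statement is the Claim_ definition above) =====
theorem square_digit_chains_spec : Claim_equal_square_digit_chains := by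
  intro limit choice _
  unfold Spec_square_digit_chains square_digit_chains square_digit_chains_alt
  rw [pvFold_eq _ _ _ (by intro s hs; simp [PySem.Dict.contains_empty] at hs)]
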